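-- pv_equiv track=rewrite | github.com/mvletter/notion-sync-lib | src/notion_sync/diff.py | _needs_reorder
-- ===== SOURCE A (Python) =====
-- from typing import Any
--
-- def _needs_reorder(ops: list[dict[str, Any]]) -> bool:
--     """Return True if the op sequence requires inserting blocks before existing ones.
--
--     The Notion API's ``append_block_children`` can only insert AFTER an existing
--     block (via the ``after`` parameter).  When ``after=None``, blocks are appended
--     to the END of the parent — there is no "prepend" operation.
--
--     This means that when ``generate_diff`` produces INSERT ops that should appear
--     BEFORE KEEP/UPDATE blocks in the final result, executing them naively would
--     place those inserts at the wrong position (end instead of beginning).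
--
--     Example problem case::
--
--         ops = [INSERT X, KEEP A, KEEP B, DELETE C]
--         # execute_diff would: insert X at end, keep A, keep B, delete C
--         # Result: [A, B, X] — wrong! X should be before A.
--
--     Returns:
--         True when any INSERT appears before a KEEP/UPDATE op (while last_block_id
--         would still be None), indicating that a full delete+reinsert is needed.
--     """
--     seen_anchor = False  # becomes True once last_block_id would be set in execute_diff
--     for i, op in enumerate(ops):
--         if op["op"] in ("KEEP", "UPDATE", "REPLACE"):
--             seen_anchor = True
--         elif op["op"] == "INSERT":
--             if not seen_anchor:
--                 # INSERT with no prior anchor — would go to END.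
--                 # Only a problem if KEEP/UPDATE blocks follow (wrong relative order).
--                 has_keep_after = any(
--                     o["op"] in ("KEEP", "UPDATE") for o in ops[i + 1:]
--                 )
--                 if has_keep_after:
--                     return True
--             seen_anchor = True
--         # DELETE does not set last_block_id
--     return False
-- ===== SOURCE B (Python) =====
-- def _needs_reorder(ops: list) -> bool:
--     # Back-to-front single pass: walking the ops in REVERSE, maintain
--     #   has_ku = whether the suffix already processed contains a KEEP/UPDATE
--     #   ans    = what _needs_reorder would return on that suffix
--     # A suffix starting with KEEP/UPDATE/REPLACE never reorders; one starting
--     # with INSERT reorders iff a KEEP/UPDATE follows; DELETE/unknown ops are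
--     # transparent. No forward rescans needed.
--     has_ku = False
--     ans = False
--     for op in reversed(ops):
--         k = op["op"]
--         if k in ("KEEP", "UPDATE"):
--             has_ku = True
--             ans = False
--         elif k == "REPLACE":
--             ans = False
--         elif k == "INSERT":
--             ans = has_ku
--         # DELETE / other: suffix answer unchanged
--     return ans
-- ===== Notes on version B (the rewrite author's own statement) =====
-- stated objective: alternative
-- what changed: Replaces A's forward loop with a seen_anchor flag plus a nested forward rescan of the suffix by a single reverse (right-to-left) pass that folds each op into a pair (has-KEEP/UPDATE-in-suffix, answer-for-suffix), so no inner scan exists.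
import Mathlib
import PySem

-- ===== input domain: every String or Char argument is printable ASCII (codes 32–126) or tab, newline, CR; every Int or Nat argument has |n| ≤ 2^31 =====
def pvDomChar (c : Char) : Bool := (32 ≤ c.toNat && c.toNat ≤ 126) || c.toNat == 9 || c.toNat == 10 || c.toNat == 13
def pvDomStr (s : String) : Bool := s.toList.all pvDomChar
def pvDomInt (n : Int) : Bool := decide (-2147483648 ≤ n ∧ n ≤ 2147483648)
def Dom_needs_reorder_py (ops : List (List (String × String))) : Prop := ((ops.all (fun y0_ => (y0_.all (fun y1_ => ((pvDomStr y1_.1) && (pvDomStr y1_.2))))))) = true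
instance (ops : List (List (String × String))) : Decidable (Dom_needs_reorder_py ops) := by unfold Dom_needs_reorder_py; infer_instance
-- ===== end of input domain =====

-- B replaces A's forward loop (seen_anchor flag + nested forward rescan) by one reverse pass
-- folding each op into (has-KEEP/UPDATE-in-suffix, answer-for-suffix). Objective: alternative.

-- ===== PORT A =====
-- op["op"] : first match in the association list (KeyError = none, excluded by Pre_; "" default unreachable under Pre_)
def pvOpKind (op : List (String × String)) : String := (op.lookup "op").getD ""

-- the for-loop of A: recursion over the list; the tail at step i is exactly ops[i+1:]
def pvALoop : List (List (String × String)) → Bool → Bool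
  | [], _ => false
  | op :: rest, seen =>
    let s := pvOpKind op
    if s == "KEEP" || s == "UPDATE" || s == "REPLACE" then pvALoop rest true
    else if s == "INSERT" then
      if !seen then
        if rest.any (fun o => pvOpKind o == "KEEP" || pvOpKind o == "UPDATE") then true
        else pvALoop rest true
      else pvALoop rest true
    else pvALoop rest seen

def needs_reorder_py (ops : List (List (String × String))) : Bool := pvALoop ops false

-- ===== PORT B =====
-- one step of Source B's reversed loop; state = (has_ku, ans)
def pvBStep (op : List (String × String)) (st : Bool × Bool) : Bool × Bool :=
  let k := pvOpKind op
  if k == "KEEP" || k == "UPDATE" then (true, false)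
  else if k == "REPLACE" then (st.1, false)
  else if k == "INSERT" then (st.1, st.1)
  else st

-- 'for op in reversed(ops)' = a right fold over ops
def needs_reorder_py_alt (ops : List (List (String × String))) : Bool :=
  (ops.foldr pvBStep (false, false)).2

-- ===== PRECONDITION & SPEC =====
-- Pre_ excludes exactly the inputs where A raises KeyError: some dict lacks the key "op".
def Pre_needs_reorder_py (ops : List (List (String × String))) : Prop :=
  ∀ op ∈ ops, (op.lookup "op").isSome = true
instance (ops : List (List (String × String))) : Decidable (Pre_needs_reorder_py ops) := by unfold Pre_needs_reorder_py; infer_instance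
def pvWitness_needs_reorder_py : (List (List (String × String))) := [[("op", "INSERT")], [("op", "KEEP")]]

def Spec_needs_reorder_py (ops : List (List (String × String))) (out : Bool) : Prop := out = needs_reorder_py_alt ops
instance (ops : List (List (String × String))) (out : Bool) : Decidable (Spec_needs_reorder_py ops out) := by unfold Spec_needs_reorder_py; infer_instance

-- ===== CLAIM (what is proved, stated in full; the proofs are below) =====
def Claim_equal_needs_reorder_py : Prop := ∀ (ops : List (List (String × String))), Dom_needs_reorder_py ops → Pre_needs_reorder_py ops → Spec_needs_reorder_py ops (needs_reorder_py ops)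

-- ===== LEMMAS AND PROOFS =====
-- once seen_anchor is True, A can never return True
theorem pvALoop_true_eq_false : ∀ (l : List (List (String × String))), pvALoop l true = false := by
  intro l
  induction l with
  | nil => rfl
  | cons op rest ih =>
    simp only [pvALoop]
    split_ifs <;> first | exact ih | simp_all

-- the first component of B's fold state records whether the suffix contains a KEEP/UPDATE
theorem pvBFold_fst : ∀ (l : List (List (String × String))),
    (l.foldr pvBStep (false, false)).1 = l.any (fun o => pvOpKind o == "KEEP" || pvOpKind o == "UPDATE") := by
  intro l
  induction l with
  | nil => rfl
  | cons op rest ih =>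
    simp only [List.foldr, List.any_cons, pvBStep]
    split_ifs with h1 h2 h3 <;> simp_all

theorem pvALoop_false_eq_alt : ∀ (l : List (List (String × String))),
    pvALoop l false = needs_reorder_py_alt l := by
  intro l
  induction l with
  | nil => rfl
  | cons op rest ih =>
    simp only [needs_reorder_py_alt, List.foldr, pvBStep, pvALoop] at *
    split_ifs with h1 h2 h3 h4 <;> simp_all [pvALoop_true_eq_false, pvBFold_fst]

-- ===== VERDICT (by name: the statement is the Claim_ definition above) =====
theorem needs_reorder_py_spec : Claim_equal_needs_reorder_py := by
  intro ops _ _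
  unfold Spec_needs_reorder_py needs_reorder_py
  exact pvALoop_false_eq_alt ops
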